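-- pv_equiv track=rewrite | github.com/shah-alt/nea1 | a.py | hash_password
-- ===== SOURCE A (Python) =====
-- def hash_password(password, salt="", rounds=10):
--     new_password = password + salt
--     hashed_value = 2166136261
--     for i in range(rounds):
--         for characters in new_password:
--             hashed_value = ((hashed_value << 5) + hashed_value) ^ ord(characters)
--             hashed_value &= 0xFFFFFFFF
--     return format(hashed_value, '08x') # returns in hex
-- ===== SOURCE B (Python) =====
-- def hash_password(password, salt="", rounds=10):
--     # Treat one round as a fixed function f on the 32-bit state and iterate it with
--     # Brent's cycle detection: keep one saved state from a power-of-two window back;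
--     # when the state revisits it, the state is lam-periodic, so skip the remaining
--     # full cycles and finish only (rounds - i) % lam extra rounds.
--     data = [ord(c) for c in password + salt]
--
--     def one_round(hv):
--         for o in data:
--             hv = ((hv * 33) ^ o) & 0xFFFFFFFF
--         return hv
--
--     hv = 2166136261
--     saved = hv
--     power = 1
--     lam = 1
--     i = 0
--     while i < rounds:
--         hv = one_round(hv)
--         i += 1
--         if hv == saved:
--             for _ in range((rounds - i) % lam):
--                 hv = one_round(hv)
--             return format(hv, '08x')
--         if lam == power:
--             saved = hv
--             power *= 2
--             lam = 0
--         lam += 1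
--     return format(hv, '08x')
-- ===== Notes on version B (the rewrite author's own statement) =====
-- stated objective: alternative
-- what changed: Treats one round as a fixed map on the 32-bit state and iterates it with Brent's cycle detection (one saved state from a power-of-two window back); on a revisit the remaining full cycles are skipped via (rounds - i) % lam and only the remainder of rounds is executed; the character update is written as hv*33 instead of (hv<<5)+hv.
import Mathlib
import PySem

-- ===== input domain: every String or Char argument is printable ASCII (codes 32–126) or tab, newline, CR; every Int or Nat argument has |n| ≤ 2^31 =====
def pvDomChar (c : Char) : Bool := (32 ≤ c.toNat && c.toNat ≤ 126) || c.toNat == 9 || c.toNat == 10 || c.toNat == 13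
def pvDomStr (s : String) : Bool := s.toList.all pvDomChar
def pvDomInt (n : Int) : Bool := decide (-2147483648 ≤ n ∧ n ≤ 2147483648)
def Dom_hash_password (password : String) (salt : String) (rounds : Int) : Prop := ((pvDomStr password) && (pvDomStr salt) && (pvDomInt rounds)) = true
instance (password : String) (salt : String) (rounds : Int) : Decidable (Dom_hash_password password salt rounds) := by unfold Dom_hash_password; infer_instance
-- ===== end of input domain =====

-- B iterates the per-round state map with Brent's cycle detection (one saved state, power-of-two
-- windows), skipping full cycles via (rounds - i) % lam (alternative algorithm; same cost when acyclic).


-- format(n, '08x') for 0 ≤ n < 2^32: lowercase hex, zero-padded to 8 digits (exact on this range)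
def pvHex8 (n : Nat) : String :=
  let ds := Nat.toDigits 16 n
  String.ofList (List.replicate (8 - ds.length) '0' ++ ds)

-- ===== PORT A =====
def hash_password (password : String) (salt : String) (rounds : Int) : String :=
  let new_password := password ++ salt
  let hashed_value : Nat := 2166136261
  let hashed_value :=
    (PySem.List.pyRange 0 rounds 1).foldl (fun hv _ =>
      new_password.toList.foldl
        (fun hv c => (((hv <<< 5) + hv) ^^^ c.toNat) &&& 0xFFFFFFFF) hv) hashed_value
  pvHex8 hashed_value

-- ===== PORT B =====
-- one_round of Source B
def pvOneRound (data : List Nat) (hv : Nat) : Nat :=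
  data.foldl (fun hv o => ((hv * 33) ^^^ o) &&& 0xFFFFFFFF) hv

-- the `while i < rounds` loop of Source B; fuel = number of remaining iterations (rounds - i),
-- so the loop condition `i < rounds` is exactly `fuel > 0`. All quantities in
-- `(rounds - i) % lam` are nonnegative with lam > 0 there, so Nat subtraction and `%` are exact.
def pvLoopB (data : List Nat) (rounds : Int) : Nat → Nat → Nat → Nat → Nat → Nat → Nat
  | hv, _saved, _power, _lam, _i, 0 => hv
  | hv, saved, power, lam, i, fuel + 1 =>
    let hv := pvOneRound data hv
    let i := i + 1
    if hv == saved then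
      (List.range ((rounds.toNat - i) % lam)).foldl (fun hv _ => pvOneRound data hv) hv
    else if lam == power then
      pvLoopB data rounds hv hv (power * 2) (0 + 1) i fuel
    else
      pvLoopB data rounds hv saved power (lam + 1) i fuel

def hash_password_alt (password : String) (salt : String) (rounds : Int) : String :=
  let data := (password ++ salt).toList.map (fun c => c.toNat)
  pvHex8 (pvLoopB data rounds 2166136261 2166136261 1 1 0 rounds.toNat)

-- ===== PRECONDITION & SPEC =====
def Spec_hash_password (password : String) (salt : String) (rounds : Int) (out : String) : Prop := out = hash_password_alt password salt rounds
instance (password : String) (salt : String) (rounds : Int) (out : String) : Decidable (Spec_hash_password password salt rounds out) := by unfold Spec_hash_password; infer_instance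

-- ===== CLAIM (what is proved, stated in full; the proofs are below) =====
def Claim_equal_hash_password : Prop := ∀ (password : String) (salt : String) (rounds : Int), Dom_hash_password password salt rounds → Spec_hash_password password salt rounds (hash_password password salt rounds)

-- ===== LEMMAS AND PROOFS =====

theorem pv_shift33 (h : Nat) : (h <<< 5) + h = h * 33 := by
  rw [Nat.shiftLeft_eq]
  omega

theorem pv_foldl_range_eq_iterate (f : Nat → Nat) : ∀ (n : Nat) (x : Nat),
    (List.range n).foldl (fun hv _ => f hv) x = f^[n] x := by
  intro n
  induction n with
  | zero => intro x; rfl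
  | succ k ih =>
      intro x
      rw [List.range_succ, List.foldl_append, ih, Function.iterate_succ_apply',
        List.foldl_cons, List.foldl_nil]

theorem pv_iterate_mod (f : Nat → Nat) (c : Nat) (hc : 0 < c) (x : Nat) (hx : f^[c] x = x) :
    ∀ n, f^[n] x = f^[n % c] x := by
  intro n
  induction n using Nat.strong_induction_on with
  | _ n ih =>
    by_cases h : n < c
    · rw [Nat.mod_eq_of_lt h]
    · push_neg at h
      have h1 : n = (n - c) + c := by omega
      rw [h1, Function.iterate_add_apply, hx, ih (n - c) (by omega)]
      congr 1
      rw [Nat.add_mod_right]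

theorem pv_loopB_eq_iterate (data : List Nat) (rounds : Int) :
    ∀ (fuel i saved power lam hv : Nat),
      i + fuel = rounds.toNat → 1 ≤ lam →
      (pvOneRound data)^[lam - 1] saved = hv →
      pvLoopB data rounds hv saved power lam i fuel = (pvOneRound data)^[fuel] hv := by
  intro fuel
  induction fuel with
  | zero => intro i saved power lam hv _ _ _; rfl
  | succ k ih =>
      intro i saved power lam hv hsum hlam hsaved
      rw [pvLoopB]
      have hstep : pvOneRound data hv = (pvOneRound data)^[lam] saved := by
        rw [← hsaved]
        rw [(Function.iterate_succ_apply' (pvOneRound data) (lam - 1) saved).symm]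
        congr 1
        omega
      by_cases heq : pvOneRound data hv = saved
      · rw [if_pos (by simpa using heq)]
        have hfix : (pvOneRound data)^[lam] (pvOneRound data hv) = pvOneRound data hv := by
          conv_lhs => rw [heq]
          rw [← hstep]
        have hfuel : rounds.toNat - (i + 1) = k := by omega
        rw [pv_foldl_range_eq_iterate, hfuel,
          ← pv_iterate_mod (pvOneRound data) lam (by omega) (pvOneRound data hv) hfix k,
          ← Function.iterate_succ_apply]
      · rw [if_neg (by simpa using heq)]
        by_cases hlp : lam = power
        · rw [if_pos (by simpa using hlp)]
          rw [ih (i + 1) (pvOneRound data hv) (power * 2) (0 + 1) (pvOneRound data hv)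
            (by omega) (by omega) (by simp), Function.iterate_succ_apply]
        · rw [if_neg (by simpa using hlp)]
          rw [ih (i + 1) saved power (lam + 1) (pvOneRound data hv) (by omega) (by omega)
            (by rw [Nat.add_sub_cancel, ← hstep]), Function.iterate_succ_apply]

theorem hash_password_spec : Claim_equal_hash_password := by
  intro password salt rounds _
  unfold Spec_hash_password hash_password hash_password_alt
  simp only [PySem.List.pyRange_one, Int.sub_zero, List.foldl_map]
  rw [pv_loopB_eq_iterate _ rounds rounds.toNat 0 2166136261 1 1 2166136261 (by omega)
    (by omega) (by simp), ← pv_foldl_range_eq_iterate]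
  have hfun : (fun (x : Nat) (_ : Nat) =>
      List.foldl (fun hv c => ((hv <<< 5) + hv ^^^ c.toNat) &&& 4294967295) x
        (password ++ salt).toList)
      = (fun (hv : Nat) (_ : Nat) =>
          pvOneRound ((password ++ salt).toList.map (fun c => c.toNat)) hv) := by
    funext hv u
    simp only [pvOneRound, List.foldl_map, pv_shift33]
  rw [hfun]
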